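-- pv_equiv track=rewrite | github.com/ElTinmar/ZebVR | ZebVR/analysis/analysis_martin.py | get_looming_boundaries
-- ===== SOURCE A (Python) =====
-- from typing import Tuple, Dict, Iterable
--
-- def get_looming_boundaries(bool_vec: Iterable):
--     in_region = False
--     looming_boundaries = []
--     for i in range(len(bool_vec)):
--         if bool_vec[i] and not in_region:
--             start = i
--             in_region = True
--         elif not bool_vec[i] and in_region:
--             end = i
--             looming_boundaries.append((start, end))
--             in_region = False
--     return looming_boundaries
-- ===== SOURCE B (Python) =====
-- def get_looming_boundaries(bool_vec):
--     vec = list(bool_vec)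
--     prev = [False] + vec
--     starts = [i for i, (p, b) in enumerate(zip(prev, vec)) if b and not p]
--     ends = [i for i, (p, b) in enumerate(zip(prev, vec)) if p and not b]
--     return list(zip(starts, ends))
-- ===== Notes on version B (the rewrite author's own statement) =====
-- stated objective: alternative
-- what changed: Replaced the stateful in_region single-pass state machine with edge detection: two passes over enumerate(zip(prev, vec)) build the rising-edge (starts) and falling-edge (ends) index lists, paired by zip, which also drops an unclosed trailing region.
import Mathlib
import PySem

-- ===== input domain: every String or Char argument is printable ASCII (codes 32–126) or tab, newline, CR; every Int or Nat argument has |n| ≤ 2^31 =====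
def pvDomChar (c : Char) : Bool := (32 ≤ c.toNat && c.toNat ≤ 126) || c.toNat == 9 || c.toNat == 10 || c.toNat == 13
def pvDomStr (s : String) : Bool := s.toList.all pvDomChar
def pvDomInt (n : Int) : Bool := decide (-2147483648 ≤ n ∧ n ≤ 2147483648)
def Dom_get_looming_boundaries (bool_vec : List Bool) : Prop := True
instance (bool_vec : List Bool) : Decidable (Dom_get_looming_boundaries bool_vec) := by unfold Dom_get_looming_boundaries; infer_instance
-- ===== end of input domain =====

-- B replaces A's in_region state machine with edge detection (rising/falling-edge index lists paired by zip); alternative decomposition, same cost.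

-- ===== PORT A =====
-- loop body of A: i is the range index; bool_vec[i] is in range for every i the loop visits
def pvStepA (v : List Bool) (st : Bool × Int × List (Int × Int)) (i : Int) :
    Bool × Int × List (Int × Int) :=
  let b := PySem.List.pyGetD v i false
  if b && !st.1 then (true, i, st.2.2)
  else if !b && st.1 then (false, st.2.1, st.2.2 ++ [(st.2.1, i)])
  else st

def get_looming_boundaries (bool_vec : List Bool) : List (Int × Int) :=
  -- in_region = False; looming_boundaries = []; start unset (0 placeholder, only read after being set)
  ((PySem.List.pyRange 0 (bool_vec.length : Int) 1).foldl (pvStepA bool_vec)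
    (false, 0, [])).2.2

-- ===== PORT B =====
def get_looming_boundaries_alt (bool_vec : List Bool) : List (Int × Int) :=
  let vec := bool_vec
  let prev := false :: vec
  let starts := ((PySem.List.enumerate (prev.zip vec) 0).filter
      (fun x => x.2.2 && !x.2.1)).map (·.1)
  let ends := ((PySem.List.enumerate (prev.zip vec) 0).filter
      (fun x => x.2.1 && !x.2.2)).map (·.1)
  starts.zip ends

-- ===== PRECONDITION & SPEC =====
def Spec_get_looming_boundaries (bool_vec : List Bool) (out : List (Int × Int)) : Prop := out = get_looming_boundaries_alt bool_vec
instance (bool_vec : List Bool) (out : List (Int × Int)) : Decidable (Spec_get_looming_boundaries bool_vec out) := by unfold Spec_get_looming_boundaries; infer_instance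

-- ===== CLAIM (what is proved, stated in full; the proofs are below) =====
def Claim_equal_get_looming_boundaries : Prop := ∀ (bool_vec : List Bool), Dom_get_looming_boundaries bool_vec → Spec_get_looming_boundaries bool_vec (get_looming_boundaries bool_vec)

-- ===== LEMMAS AND PROOFS =====

-- structural version of A's loop (i is the index of the head of v; inr/s/acc the state)
def pvRunA (v : List Bool) (i : Int) (inr : Bool) (s : Int) (acc : List (Int × Int)) :
    List (Int × Int) :=
  match v with
  | [] => acc
  | b :: t =>
    if b && !inr then pvRunA t (i+1) true i acc
    else if !b && inr then pvRunA t (i+1) false s (acc ++ [(s, i)])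
    else pvRunA t (i+1) inr s acc

-- structural versions of B's two edge lists (p = previous element, false before index 0)
def pvStarts (p : Bool) (v : List Bool) (i : Int) : List Int :=
  match v with
  | [] => []
  | b :: t => if b && !p then i :: pvStarts b t (i+1) else pvStarts b t (i+1)

def pvEnds (p : Bool) (v : List Bool) (i : Int) : List Int :=
  match v with
  | [] => []
  | b :: t => if p && !b then i :: pvEnds b t (i+1) else pvEnds b t (i+1)

lemma pvBridgeA (v : List Bool) (n : Nat) :
    ∀ (k : Nat) (inr : Bool) (s : Int) (acc : List (Int × Int)), v.length = k + n →
      ((PySem.List.pyRange (k : Int) (v.length : Int) 1).foldl (pvStepA v) (inr, s, acc)).2.2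
        = pvRunA (v.drop k) (k : Int) inr s acc := by
  induction n with
  | zero =>
    intro k inr s acc hk
    have hle : v.length ≤ k := by omega
    rw [PySem.List.pyRange_one_eq_nil (by exact_mod_cast hle)]
    rw [List.drop_eq_nil_of_le hle]
    rfl
  | succ m ih =>
    intro k inr s acc hk
    have hklt : k < v.length := by omega
    rw [PySem.List.pyRange_one_cons (by exact_mod_cast hklt)]
    rw [List.foldl_cons]
    have hdrop : v.drop k = v[k] :: v.drop (k+1) := (List.getElem_cons_drop hklt).symm
    have hget : PySem.List.pyGetD v (k : Int) false = v[k] := by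
      rw [PySem.List.pyGetD_natCast]; exact List.getD_eq_getElem v false hklt
    have hcast : (k : Int) + 1 = ((k + 1 : Nat) : Int) := by push_cast; ring
    rw [hdrop]
    cases hv : v[k] <;> cases inr <;>
      simp only [pvStepA, hget, hv, pvRunA, Bool.not_true, Bool.not_false, Bool.and_true,
        Bool.and_false, Bool.true_and, Bool.false_and, if_true, if_false, ite_true, ite_false,
        Bool.false_eq_true, Bool.true_eq_false] <;>
      rw [hcast] <;> exact ih (k+1) _ _ _ (by omega)

lemma pvMain (v : List Bool) :
    ∀ (i : Int) (inr : Bool) (s : Int) (acc : List (Int × Int)),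
      pvRunA v i inr s acc
        = acc ++ List.zip ((if inr then [s] else []) ++ pvStarts inr v i) (pvEnds inr v i) := by
  induction v with
  | nil => intro i inr s acc; cases inr <;> simp [pvRunA, pvStarts, pvEnds]
  | cons b t ih =>
    intro i inr s acc
    cases b <;> cases inr <;>
      simp only [pvRunA, pvStarts, pvEnds, Bool.not_true, Bool.not_false, Bool.and_true,
        Bool.and_false, ite_true, ite_false,
        Bool.false_eq_true] <;>
      rw [ih] <;> simp [List.zip_cons_cons]

lemma pvBridgeStarts (v : List Bool) :
    ∀ (p : Bool) (i : Int),
      ((PySem.List.enumerate ((p :: v).zip v) i).filter (fun x => x.2.2 && !x.2.1)).map (·.1)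
        = pvStarts p v i := by
  induction v with
  | nil => intro p i; simp [pvStarts]
  | cons b t ih =>
    intro p i
    rw [List.zip_cons_cons, PySem.List.enumerate_cons]
    cases b <;> cases p <;>
      simp only [List.filter_cons, pvStarts, Bool.not_true, Bool.not_false, Bool.and_true,
        Bool.and_false, ite_true, ite_false, List.map_cons,
        Bool.false_eq_true] <;>
      rw [ih]

lemma pvBridgeEnds (v : List Bool) :
    ∀ (p : Bool) (i : Int),
      ((PySem.List.enumerate ((p :: v).zip v) i).filter (fun x => x.2.1 && !x.2.2)).map (·.1)
        = pvEnds p v i := by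
  induction v with
  | nil => intro p i; simp [pvEnds]
  | cons b t ih =>
    intro p i
    rw [List.zip_cons_cons, PySem.List.enumerate_cons]
    cases b <;> cases p <;>
      simp only [List.filter_cons, pvEnds, Bool.not_true, Bool.not_false, Bool.and_true,
        Bool.and_false, ite_true, ite_false, List.map_cons,
        Bool.false_eq_true] <;>
      rw [ih]

-- ===== VERDICT (by name: the statement is the Claim_ definition above) =====
theorem get_looming_boundaries_spec : Claim_equal_get_looming_boundaries := by
  intro v _
  unfold Spec_get_looming_boundaries get_looming_boundaries get_looming_boundaries_alt
  have hb := pvBridgeA v v.length 0 false 0 [] (by omega)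
  simp only [Nat.cast_zero, List.drop_zero] at hb
  rw [hb, pvMain]
  simp only [if_neg (by decide : ¬ (false = true)), List.nil_append]
  rw [pvBridgeStarts, pvBridgeEnds]
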